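-- pv_equiv track=rewrite | github.com/PeterKlaus18/IP | N3/N3-PROY-p.pachon/modulo_olimpicos.py | medallas_por_pais
-- ===== SOURCE A (Python) =====
-- def medallas_por_pais(atletas_medalla:dict, tipo_medalla:str)->dict:
--     """Genera un diccionario donde la llave es el nombre del país y el valor una lista con los
--     atletas que han obtenido el tipo de medalla solicitado a lo largo de todos los años.
--
--     {'algeria': [{'nombre': 'amar benikhlef', 'genero': 'm', 'edad': '26', 'pais': 'algeria', 'anio':
--     '2008', 'evento': "judo men's middleweight", 'medalla': 'silver'},{'nombre': 'taoufik makhloufi',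
--     'genero': 'm', 'edad': '28', 'pais': 'algeria', 'anio': '2016', 'evento': "athletics men's 800
--     metres", 'medalla': 'silver'}, … ],
--     …
--     …
--     “argentina”: [{'nombre': 'matas jess almeyda', 'genero': 'm', 'edad': '22', 'pais': 'argentina',
--     'anio': '1996', 'evento': "football men's football", 'medalla': 'silver'},{'nombre': 'roberto fabin
--     ayala', 'genero': 'm', 'edad': '23', 'pais': 'argentina', 'anio': '1996', 'evento': "football men's
--     football", 'medalla': 'silver'}…]"""
--
--     dicc_medallas_pais= {}
--
--     for cada_atleta in atletas_medalla[tipo_medalla]: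
--
--         if cada_atleta["pais"] not in dicc_medallas_pais:
--             dicc_medallas_pais[cada_atleta["pais"]]= [cada_atleta]
--
--         else:
--             dicc_medallas_pais[cada_atleta["pais"]].append(cada_atleta)
--
--     return dicc_medallas_pais
-- ===== SOURCE B (Python) =====
-- def medallas_por_pais(atletas_medalla: dict, tipo_medalla: str) -> dict:
--     """Agrupa por pais con una recursion de particion (quick-group): toma el pais del
--     primer atleta, separa su grupo completo de una vez, y recurre sobre los restantes."""
--     def agrupar(atletas):
--         if not atletas:
--             return {}
--         pais = atletas[0]["pais"]
--         grupos = {pais: [a for a in atletas if a["pais"] == pais]}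
--         grupos.update(agrupar([a for a in atletas[1:] if a["pais"] != pais]))
--         return grupos
--     return agrupar(atletas_medalla[tipo_medalla])
-- ===== Notes on version B (the rewrite author's own statement) =====
-- stated objective: alternative
-- what changed: Replaces A's single-pass dict accumulation (membership test + append per athlete) with a quick-group partition recursion: take the first athlete's country, split off that whole group with one filter, and recurse on the remaining athletes; first-appearance key order falls out of the recursion.
import Mathlib
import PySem

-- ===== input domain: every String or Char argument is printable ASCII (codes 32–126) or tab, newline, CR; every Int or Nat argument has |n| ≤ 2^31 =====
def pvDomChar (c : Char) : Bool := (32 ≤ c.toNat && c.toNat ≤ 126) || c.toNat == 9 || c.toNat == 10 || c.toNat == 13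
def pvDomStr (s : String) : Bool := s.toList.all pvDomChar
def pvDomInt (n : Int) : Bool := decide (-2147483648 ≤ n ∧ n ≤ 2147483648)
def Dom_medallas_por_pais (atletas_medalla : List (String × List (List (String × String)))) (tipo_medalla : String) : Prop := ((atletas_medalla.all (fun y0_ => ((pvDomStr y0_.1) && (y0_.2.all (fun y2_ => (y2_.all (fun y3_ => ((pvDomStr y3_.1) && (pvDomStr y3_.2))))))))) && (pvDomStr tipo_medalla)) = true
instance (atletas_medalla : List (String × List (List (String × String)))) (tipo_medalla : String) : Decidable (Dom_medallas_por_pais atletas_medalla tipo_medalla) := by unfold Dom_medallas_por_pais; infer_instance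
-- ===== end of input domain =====

-- B replaces A's incremental dict accumulation with a quick-group partition recursion
-- (objective: alternative; same return value, no speed claim).

-- ===== PORT A =====
-- a["pais"] (first match; Pre_ guarantees the key is present)
def paisOf (a : List (String × String)) : String :=
  (PySem.Dict.ofList a).getD "pais" ""

-- Port of A: dicc = {}; for a in atletas_medalla[tipo_medalla]:
--   if a["pais"] not in dicc: dicc[pais] = [a]  else: dicc[pais].append(a)
def medallas_por_pais (atletas_medalla : List (String × List (List (String × String)))) (tipo_medalla : String) : List (String × List (List (String × String))) :=
  let atletas := (PySem.Dict.ofList atletas_medalla).getD tipo_medalla []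
  (atletas.foldl
    (fun dicc a =>
      if dicc.contains (paisOf a) = false then dicc.insert (paisOf a) [a]
      else dicc.modify (paisOf a) [] (fun v => v ++ [a]))
    PySem.Dict.empty).items

-- ===== PORT B =====
-- a["pais"] in Source B's helper (same Python expression as in A, ported once per side)
def pvPaisB (a : List (String × String)) : String :=
  (PySem.Dict.ofList a).getD "pais" ""

-- Port of Source B's `agrupar`: {pais: [a for a in atletas if a["pais"] == pais]} followed by
-- grupos.update(agrupar(resto)); the recursive call's keys are countries of `resto`, all ≠ pais,
-- so the update appends its items after the head pair — exactly the cons below.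
def agruparB : List (List (String × String)) → List (String × List (List (String × String)))
  | [] => []
  | a :: resto_bruto =>
      let pais := pvPaisB a
      (pais, (a :: resto_bruto).filter (fun x => pvPaisB x == pais)) ::
        agruparB (resto_bruto.filter (fun x => !(pvPaisB x == pais)))
  termination_by l => l.length
  decreasing_by
    simp only [List.length_unattach, List.length_cons]
    exact Nat.lt_succ_of_le (le_trans (List.length_filter_le _ _) (by simp))

def medallas_por_pais_alt (atletas_medalla : List (String × List (List (String × String)))) (tipo_medalla : String) : List (String × List (List (String × String))) :=
  agruparB ((PySem.Dict.ofList atletas_medalla).getD tipo_medalla [])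

-- ===== PRECONDITION & SPEC =====
-- Pre_ excludes inputs where Python A raises KeyError (missing medal type, or an athlete in the
-- selected list without a "pais" key), and athletes with duplicate keys, on which the
-- association-list/dict correspondence is accidental (a Python dict cannot hold duplicate keys).
def Pre_medallas_por_pais (atletas_medalla : List (String × List (List (String × String)))) (tipo_medalla : String) : Prop :=
  (PySem.Dict.ofList atletas_medalla).contains tipo_medalla = true ∧
  ∀ a ∈ (PySem.Dict.ofList atletas_medalla).getD tipo_medalla [],
    (a.map Prod.fst).Nodup ∧ "pais" ∈ a.map Prod.fst
instance (atletas_medalla : List (String × List (List (String × String)))) (tipo_medalla : String) : Decidable (Pre_medallas_por_pais atletas_medalla tipo_medalla) := by unfold Pre_medallas_por_pais; infer_instance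

def pvWitness_medallas_por_pais : (List (String × List (List (String × String)))) × String :=
  ([("gold", [[("pais", "arg"), ("nombre", "x")], [("pais", "alg")]])], "gold")

def Spec_medallas_por_pais (atletas_medalla : List (String × List (List (String × String)))) (tipo_medalla : String) (out : List (String × List (List (String × String)))) : Prop := out = medallas_por_pais_alt atletas_medalla tipo_medalla
instance (atletas_medalla : List (String × List (List (String × String)))) (tipo_medalla : String) (out : List (String × List (List (String × String)))) : Decidable (Spec_medallas_por_pais atletas_medalla tipo_medalla out) := by unfold Spec_medallas_por_pais; infer_instance

-- ===== CLAIM (what is proved, stated in full; the proofs are below) =====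
def Claim_equal_medallas_por_pais : Prop := ∀ (atletas_medalla : List (String × List (List (String × String)))) (tipo_medalla : String), Dom_medallas_por_pais atletas_medalla tipo_medalla → Pre_medallas_por_pais atletas_medalla tipo_medalla → Spec_medallas_por_pais atletas_medalla tipo_medalla (medallas_por_pais atletas_medalla tipo_medalla)

-- ===== LEMMAS AND PROOFS =====

-- A's two branches are a single Python-style `modify` (an absent key gets [] ++ [a] appended at the end).
lemma stepA_eq_modify (d : PySem.Dict String (List (List (String × String)))) (a : List (String × String)) :
    (if d.contains (paisOf a) = false then d.insert (paisOf a) [a]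
     else d.modify (paisOf a) [] (fun v => v ++ [a]))
    = d.modify (paisOf a) [] (fun v => v ++ [a]) := by
  by_cases h : d.contains (paisOf a) = false
  · rw [if_pos h, PySem.Dict.modify, PySem.Dict.getD_of_not_contains _ _ h, List.nil_append]
  · simp [h]

-- A's loop items, characterised: distinct countries in first-appearance order, each with its filter.
lemma items_group (atletas : List (List (String × String))) :
    (atletas.foldl (fun d a => d.modify (paisOf a) [] (fun v => v ++ [a])) PySem.Dict.empty).items
    = (PySem.List.dedup (atletas.map paisOf)).map
        (fun pais => (pais, atletas.filter (fun a => paisOf a == pais))) := by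
  have hkeys : (atletas.foldl (fun d a => d.modify (paisOf a) [] (fun v => v ++ [a])) PySem.Dict.empty).keys
      = PySem.List.dedup (atletas.map paisOf) := by
    rw [PySem.Dict.keys_foldl_modify_key atletas paisOf [] (fun _ a v => v ++ [a])]
    simp [PySem.Dict.keys_empty, PySem.Set.update_eq_append_filter, PySem.List.dedup_eq_ofList,
      PySem.Set.contains]
  have hnd : (atletas.foldl (fun d a => d.modify (paisOf a) [] (fun v => v ++ [a])) PySem.Dict.empty).keys.Nodup := by
    exact PySem.Dict.nodup_keys_foldl_modify_key atletas paisOf [] (fun _ a v => v ++ [a]) _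
      PySem.Dict.nodup_keys_empty
  have hget : ∀ c, (atletas.foldl (fun d a => d.modify (paisOf a) [] (fun v => v ++ [a])) PySem.Dict.empty).getD c []
      = atletas.filter (fun a => paisOf a == c) := by
    intro c
    have hmap : atletas.foldl (fun d a => d.modify (paisOf a) [] (fun v => v ++ [a])) PySem.Dict.empty
        = (atletas.map (fun a => (paisOf a, a))).foldl (fun d p => d.modify p.1 [] (fun v => v ++ [p.2])) PySem.Dict.empty := by
      rw [List.foldl_map]
    rw [hmap, PySem.Dict.getD_foldl_modify_append, PySem.Dict.getD_empty, List.nil_append,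
      List.filter_map]
    simp [Function.comp_def]
  rw [PySem.Dict.items_eq_map_keys _ hnd [], hkeys]
  exact List.map_congr_left (fun k _ => by rw [hget k])

-- set-of-list commutes with filtering out one element.
lemma ofList_filter_ne (x : String) (l : List String) :
    PySem.Set.ofList (l.filter (fun y => !(y == x)))
    = PySem.Set.discard (PySem.Set.ofList l) x := by
  induction l with
  | nil => simp [PySem.Set.ofList_nil, PySem.Set.discard]
  | cons a l ih =>
    by_cases h : a = x
    · subst h
      simp [PySem.Set.ofList_cons, PySem.Set.discard, List.filter_filter, ih]
    · have hax : (a == x) = false := by simp [h]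
      simp only [List.filter_cons, hax, Bool.not_false, if_pos, PySem.Set.ofList_cons, ih,
        PySem.Set.discard, List.filter_cons]
      simp [List.filter_filter, Bool.and_comm]

-- Python ordered dedup of a cons: head, then dedup of the tail with the head removed.
lemma dedup_cons_filter (x : String) (l : List String) :
    PySem.List.dedup (x :: l) = x :: PySem.List.dedup (l.filter (fun y => !(y == x))) := by
  simp only [PySem.List.dedup_eq_ofList, PySem.Set.ofList_cons, ofList_filter_ne]

-- B's recursion computes exactly that characterisation.
lemma agruparB_char (atletas : List (List (String × String))) :
    agruparB atletas
    = (PySem.List.dedup (atletas.map pvPaisB)).map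
        (fun pais => (pais, atletas.filter (fun a => pvPaisB a == pais))) := by
  induction atletas using agruparB.induct with
  | case1 => simp [agruparB, PySem.List.dedup_eq_ofList, PySem.Set.ofList_nil]
  | case2 a resto_bruto pais ih =>
    simp only [List.unattach_filter, List.unattach_attach] at ih
    rw [agruparB, List.map_cons, dedup_cons_filter, List.map_cons, ih]
    have hhead : ((a :: resto_bruto).filter (fun x => pvPaisB x == pvPaisB a))
        = (a :: resto_bruto).filter (fun x => pvPaisB x == pais) := by rfl
    have hmapfilter : (resto_bruto.map pvPaisB).filter (fun y => !(y == pais))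
        = (resto_bruto.filter (fun x => !(pvPaisB x == pais))).map pvPaisB := by
      rw [List.filter_map]; rfl
    rw [hmapfilter]
    refine congrArg₂ List.cons rfl ?_
    refine List.map_congr_left ?_
    intro q hq
    have hqmem : q ∈ (resto_bruto.filter (fun x => !(pvPaisB x == pais))).map pvPaisB :=
      (PySem.List.mem_dedup _ _).mp hq
    have hqne : q ≠ pais := by
      rcases List.mem_map.mp hqmem with ⟨x, hx, hxe⟩
      have := List.of_mem_filter hx
      intro hcontra
      rw [hxe, hcontra] at this
      simp at this
    refine congrArg₂ Prod.mk rfl ?_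
    rw [List.filter_filter]
    have hpts : ∀ x, ((pvPaisB x == q) && !(pvPaisB x == pais)) = (pvPaisB x == q) := by
      intro x
      by_cases hxq : pvPaisB x = q
      · simp [hxq, hqne]
      · simp [hxq]
    rw [List.filter_congr (fun x _ => hpts x)]
    have hheadne : (pvPaisB a == q) = false := by
      have : pais ≠ q := fun h => hqne h.symm
      simp [pvPaisB] at this ⊢
      exact this
    simp [hheadne]

-- ===== VERDICT (by name: the statement is the Claim_ definition above) =====
theorem medallas_por_pais_spec : Claim_equal_medallas_por_pais := by
  intro atletas_medalla tipo_medalla _ _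
  unfold Spec_medallas_por_pais medallas_por_pais medallas_por_pais_alt
  have hstep : (fun (d : PySem.Dict String (List (List (String × String)))) a =>
      if d.contains (paisOf a) = false then d.insert (paisOf a) [a]
      else d.modify (paisOf a) [] (fun v => v ++ [a]))
      = (fun d a => d.modify (paisOf a) [] (fun v => v ++ [a])) := by
    funext d a; exact stepA_eq_modify d a
  rw [hstep, items_group, agruparB_char]
  rfl
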